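-- pv_equiv track=rewrite | github.com/bencejdanko/solitaire-scrabble | dev/solitaire_scrabble/compute/__init__.py | draw_hand
-- ===== SOURCE A (Python) =====
-- from typing import Dict, List, Tuple
--
-- def draw_hand(tile_sequence: List[str], current_hand: List[str] = [], hand_size: int = 7) -> Tuple[List[str], List[str]]:
--     """
--     Given a sequence of tiles and a current hand, draw a new hand and return the new hand and the new sequence.
--
--     tile_sequence is a sequence of tiles.
--     current_hand is the current hand.
--     hand_size is the size of the hand.
--
--     Example output would be:
--     draw_hand(['a', 'b', 'c', 'd', 'e', 'f', 'g'], ['a', 'b'], 7)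
--     (['f', 'g'], ['a', 'b', 'a', 'b', 'c', 'd', 'e'])
--     """
--     new_hand: List[str] = current_hand.copy()
--     new_sequence: List[str] = tile_sequence.copy()
--
--     while len(new_hand) < hand_size:
--         # handle if the sequence is empty
--         if not new_sequence:
--             break
--         new_hand.append(new_sequence.pop(0))
--     return new_sequence, new_hand
-- ===== SOURCE B (Python) =====
-- def draw_hand(tile_sequence, current_hand=[], hand_size=7):
--     k = max(0, hand_size - len(current_hand))
--     return tile_sequence[k:], current_hand + tile_sequence[:k]
-- ===== Notes on version B (the rewrite author's own statement) =====
-- stated objective: simpler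
-- what changed: Replaces the while-loop of repeated pop(0)/append with a closed-form slice split at k = max(0, hand_size - len(current_hand)).
import Mathlib
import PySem

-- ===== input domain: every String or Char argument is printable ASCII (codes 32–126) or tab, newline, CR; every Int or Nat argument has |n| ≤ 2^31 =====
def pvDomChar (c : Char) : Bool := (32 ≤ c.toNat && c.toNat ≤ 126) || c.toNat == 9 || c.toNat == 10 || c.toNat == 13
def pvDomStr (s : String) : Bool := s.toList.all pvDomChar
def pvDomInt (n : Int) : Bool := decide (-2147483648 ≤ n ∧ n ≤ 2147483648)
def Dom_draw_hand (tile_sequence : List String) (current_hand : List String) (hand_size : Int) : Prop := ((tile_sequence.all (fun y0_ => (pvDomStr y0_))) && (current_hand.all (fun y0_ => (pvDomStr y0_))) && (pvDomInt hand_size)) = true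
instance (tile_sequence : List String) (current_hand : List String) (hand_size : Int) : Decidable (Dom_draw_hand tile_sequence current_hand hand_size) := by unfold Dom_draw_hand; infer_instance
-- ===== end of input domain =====

-- B replaces A's pop(0)/append while-loop with a closed-form slice split; objective: simpler.
-- ===== PORT A =====
-- the while-loop: while len(new_hand) < hand_size: if not new_sequence: break; new_hand.append(new_sequence.pop(0))
def drawLoopA (new_sequence new_hand : List String) (hand_size : Int) : List String × List String :=
  if (new_hand.length : Int) < hand_size then
    match new_sequence with
    | [] => (new_sequence, new_hand)
    | t :: rest => drawLoopA rest (new_hand ++ [t]) hand_size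
  else (new_sequence, new_hand)

def draw_hand (tile_sequence : List String) (current_hand : List String) (hand_size : Int) : List String × List String :=
  drawLoopA tile_sequence current_hand hand_size

-- ===== PORT B =====
def draw_hand_alt (tile_sequence : List String) (current_hand : List String) (hand_size : Int) : List String × List String :=
  let k : Int := max 0 (hand_size - (current_hand.length : Int))
  (PySem.List.slice tile_sequence (some k) none, current_hand ++ PySem.List.slice tile_sequence none (some k))

-- ===== PRECONDITION & SPEC =====
def Spec_draw_hand (tile_sequence : List String) (current_hand : List String) (hand_size : Int) (out : List String × List String) : Prop := out = draw_hand_alt tile_sequence current_hand hand_size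
instance (tile_sequence : List String) (current_hand : List String) (hand_size : Int) (out : List String × List String) : Decidable (Spec_draw_hand tile_sequence current_hand hand_size out) := by unfold Spec_draw_hand; infer_instance

-- ===== CLAIM (what is proved, stated in full; the proofs are below) =====
def Claim_equal_draw_hand : Prop := ∀ (tile_sequence : List String) (current_hand : List String) (hand_size : Int), Dom_draw_hand tile_sequence current_hand hand_size → Spec_draw_hand tile_sequence current_hand hand_size (draw_hand tile_sequence current_hand hand_size)

-- ===== LEMMAS AND PROOFS =====

lemma drawLoopA_eq : ∀ (seq hand : List String) (hs : Int),
    drawLoopA seq hand hs =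
      (seq.drop (max 0 (hs - (hand.length : Int))).toNat,
       hand ++ seq.take (max 0 (hs - (hand.length : Int))).toNat) := by
  intro seq
  induction seq with
  | nil => intro hand hs; unfold drawLoopA; split <;> simp
  | cons t rest ih =>
      intro hand hs
      unfold drawLoopA
      by_cases h : (hand.length : Int) < hs
      · simp only [if_pos h]
        rw [ih]
        have hk : (max 0 (hs - (hand.length : Int))).toNat
            = (max 0 (hs - ((hand ++ [t]).length : Int))).toNat + 1 := by
          simp only [List.length_append, List.length_cons, List.length_nil]
          omega
        rw [hk]
        simp
      · simp only [if_neg h]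
        have : (max 0 (hs - (hand.length : Int))).toNat = 0 := by omega
        simp [this]

-- ===== VERDICT (by name: the statement is the Claim_ definition above) =====
theorem draw_hand_spec : Claim_equal_draw_hand := by
  intro ts ch hs _
  unfold Spec_draw_hand draw_hand draw_hand_alt
  dsimp only
  rw [drawLoopA_eq]
  have hk : (0:Int) ≤ max 0 (hs - (ch.length : Int)) := le_max_left _ _
  rw [PySem.List.slice_from _ hk, PySem.List.slice_to _ hk]
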